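-- pv_equiv track=rewrite | github.com/thanakritju/advent-of-code | aoc2020/day9/xmas.py | exploit_weakness
-- ===== SOURCE A (Python) =====
-- def exploit_weakness(numbers, weakness):
--     for index, number in enumerate(numbers):
--         list_length = 2
--         contiguous_list = numbers[index:index + list_length]
--         sum_contiguous_list = sum(contiguous_list)
--         while True:
--             if sum_contiguous_list == weakness:
--                 return max(contiguous_list) + min(contiguous_list)
--             elif sum_contiguous_list > weakness:
--                 break
--             else:
--                 list_length += 1
--                 contiguous_list = numbers[index:index + list_length]
--                 sum_contiguous_list = sum(contiguous_list)
-- ===== SOURCE B (Python) =====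
-- def exploit_weakness(numbers, weakness):
--     # Prefix-sum reformulation: running sums computed once; for each start
--     # find the first window end whose sum reaches the weakness (no re-slicing/re-summing).
--     n = len(numbers)
--     prefix = [0]
--     for x in numbers:
--         prefix.append(prefix[-1] + x)
--     for start in range(n):
--         base = prefix[start]
--         first = min(start + 2, n)
--         end = next((j for j in range(first, n + 1) if prefix[j] - base >= weakness), None)
--         if end is not None and prefix[end] - base == weakness:
--             window = numbers[start:end]
--             return max(window) + min(window)
--     return None
-- ===== Notes on version B (the rewrite author's own statement) =====
-- stated objective: alternative
-- what changed: B precomputes prefix sums once and, per start index, finds the first window end whose prefix-sum difference reaches the weakness, instead of A's re-slicing and re-summing of a growing window inside a while-True loop; Pre_ excludes exactly the inputs on which A's while-True loop never terminates (a reached start index whose window sums never reach the weakness), where A returns nothing.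
import Mathlib
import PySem

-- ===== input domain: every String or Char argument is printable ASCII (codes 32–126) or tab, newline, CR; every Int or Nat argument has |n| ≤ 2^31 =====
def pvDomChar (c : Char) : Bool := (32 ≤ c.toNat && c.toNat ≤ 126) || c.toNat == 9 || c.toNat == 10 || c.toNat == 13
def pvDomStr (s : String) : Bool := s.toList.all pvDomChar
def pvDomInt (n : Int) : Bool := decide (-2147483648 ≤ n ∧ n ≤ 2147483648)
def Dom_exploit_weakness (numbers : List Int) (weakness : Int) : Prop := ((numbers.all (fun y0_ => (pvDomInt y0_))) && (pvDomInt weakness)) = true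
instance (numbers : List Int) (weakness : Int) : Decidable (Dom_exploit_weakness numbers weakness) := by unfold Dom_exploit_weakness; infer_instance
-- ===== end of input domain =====

-- B replaces A's grow-reslice-resum while-True loop by prefix sums computed once plus a
-- first-crossing search per start index (alternative algorithm); return values only.

-- ===== PORT A =====
-- Python A's inner `while True` diverges when the (saturated) window sum stays below the
-- weakness; the port runs it on fuel numbers.length+1 (enough for every terminating scan)
-- and signals exhaustion as `none` (return value = `some r`): Pre_ excludes the divergent inputs.
def ewAMaxMin (w : List Int) : Option Int :=
  -- max(contiguous_list) + min(contiguous_list); both raise only on [], guarded by the match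
  match PySem.List.max? w (fun y => y), PySem.List.min? w (fun y => y) with
  | some a, some b => some (a + b)
  | _, _ => none

def ewAInner (numbers : List Int) (weakness : Int) (index : Nat) :
    Nat → Nat → Option (Option Int)
  | _, 0 => none     -- fuel exhausted: Python diverges here (outside Pre_)
  | L, fuel + 1 =>
    let w := PySem.List.slice numbers (some (index : Int)) (some ((index : Int) + (L : Int)))
    let s := w.sum
    if s = weakness then some (ewAMaxMin w)
    else if weakness < s then some none            -- break
    else ewAInner numbers weakness index (L + 1) fuel

def ewAOuter (numbers : List Int) (weakness : Int) : List Nat → Option Int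
  | [] => none
  | i :: rest =>
    match ewAInner numbers weakness i 2 (numbers.length + 1) with
    | some (some v) => some v
    | some none => ewAOuter numbers weakness rest
    | none => none                -- divergence marker (outside Pre_)

def exploit_weakness (numbers : List Int) (weakness : Int) : Option Int :=
  ewAOuter numbers weakness (List.range numbers.length)

-- ===== PORT B =====
def ewBPrefix (numbers : List Int) : List Int :=
  -- prefix = [0]; for x in numbers: prefix.append(prefix[-1] + x)
  numbers.foldl (fun p x => p ++ [PySem.List.pyGetD p (-1) 0 + x]) [0]

def ewBInner (numbers : List Int) (weakness : Int) (pfx : List Int) (start : Nat) : Option Int :=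
  let n : Int := numbers.length
  let base := PySem.List.pyGetD pfx (start : Int) 0
  let first : Int := min ((start : Int) + 2) n
  match (PySem.List.pyRange first (n + 1) 1).find?
      (fun j => decide (weakness ≤ PySem.List.pyGetD pfx j 0 - base)) with
  | some j =>
    if PySem.List.pyGetD pfx j 0 - base = weakness then
      match PySem.List.max? (PySem.List.slice numbers (some (start : Int)) (some j)) (fun y => y),
            PySem.List.min? (PySem.List.slice numbers (some (start : Int)) (some j)) (fun y => y) with
      | some a, some b => some (a + b)
      | _, _ => none
    else none
  | none => none

def ewBOuter (numbers : List Int) (weakness : Int) (pfx : List Int) : List Nat → Option Int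
  | [] => none
  | s :: rest =>
    match ewBInner numbers weakness pfx s with
    | some v => some v
    | none => ewBOuter numbers weakness pfx rest

def exploit_weakness_alt (numbers : List Int) (weakness : Int) : Option Int :=
  ewBOuter numbers weakness (ewBPrefix numbers) (List.range numbers.length)

-- ===== PRECONDITION & SPEC =====
-- ewS numbers i j = sum(numbers[i:j]) for Nat indices i ≤ j
def ewS (numbers : List Int) (i j : Nat) : Int := ((numbers.drop i).take (j - i)).sum

-- Pre_ excludes exactly the inputs on which A's while-True loop never terminates: a start
-- index none of whose window sums ever reaches the weakness, reached because every earlier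
-- start index broke rather than returned (A returns no value on those inputs).
-- no window starting at i (of length ≥ 2, end clamped to n) ever sums up to the weakness
def ewNoCross (numbers : List Int) (weakness : Int) (i : Nat) : Bool :=
  (List.range (numbers.length + 1)).all fun j =>
    !(decide (min (i + 2) numbers.length ≤ j)) || decide (ewS numbers i j < weakness)

-- the first window starting at k whose sum reaches the weakness sums to it exactly
def ewRet (numbers : List Int) (weakness : Int) (k : Nat) : Bool :=
  (List.range (numbers.length + 1)).any fun j =>
    decide (min (k + 2) numbers.length ≤ j) && decide (ewS numbers k j = weakness) &&
    ((List.range j).all fun j' =>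
      !(decide (min (k + 2) numbers.length ≤ j')) || decide (ewS numbers k j' < weakness))

def Pre_exploit_weakness (numbers : List Int) (weakness : Int) : Prop :=
  ((List.range numbers.length).all fun i =>
    !(ewNoCross numbers weakness i) || (List.range i).any (ewRet numbers weakness)) = true
instance (numbers : List Int) (weakness : Int) : Decidable (Pre_exploit_weakness numbers weakness) := by
  unfold Pre_exploit_weakness; infer_instance

def pvWitness_exploit_weakness : List Int × Int := ([1, 2, 3], 3)

def Spec_exploit_weakness (numbers : List Int) (weakness : Int) (out : Option Int) : Prop := out = exploit_weakness_alt numbers weakness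
instance (numbers : List Int) (weakness : Int) (out : Option Int) : Decidable (Spec_exploit_weakness numbers weakness out) := by unfold Spec_exploit_weakness; infer_instance

-- ===== CLAIM (what is proved, stated in full; the proofs are below) =====
def Claim_equal_exploit_weakness : Prop := ∀ (numbers : List Int) (weakness : Int), Dom_exploit_weakness numbers weakness → Pre_exploit_weakness numbers weakness → Spec_exploit_weakness numbers weakness (exploit_weakness numbers weakness)

-- ===== LEMMAS AND PROOFS =====

-- running sums of xs starting from base c
def ewPsums (c : Int) : List Int → List Int
  | [] => []
  | x :: xs => (c + x) :: ewPsums (c + x) xs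

lemma ewFoldl_step (xs : List Int) : ∀ (acc : List Int) (h : acc ≠ []),
    xs.foldl (fun p x => p ++ [PySem.List.pyGetD p (-1) 0 + x]) acc
      = acc ++ ewPsums (acc.getLast h) xs := by
  induction xs with
  | nil => intro acc h; simp [ewPsums]
  | cons x xs ih =>
    intro acc h
    have hne : acc ++ [acc.getLast h + x] ≠ [] := by simp
    have hget : PySem.List.pyGetD acc (-1) 0 = acc.getLast h :=
      PySem.List.pyGetD_neg_one (xs := acc) (d := 0) h
    have := ih (acc ++ [acc.getLast h + x]) hne
    simp only [List.foldl_cons, hget]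
    rw [this, List.getLast_concat, List.append_assoc]
    simp [ewPsums]

lemma ewBPrefix_eq (numbers : List Int) : ewBPrefix numbers = 0 :: ewPsums 0 numbers := by
  have := ewFoldl_step numbers [0] (by simp)
  simpa [ewBPrefix] using this

lemma ewPsums_get (xs : List Int) : ∀ (c : Int) (k : Nat), k < xs.length →
    (ewPsums c xs)[k]? = some (c + (xs.take (k + 1)).sum) := by
  induction xs with
  | nil => intro c k hk; simp at hk
  | cons x xs ih =>
    intro c k hk
    cases k with
    | zero => simp [ewPsums]
    | succ k =>
      have hk' : k < xs.length := by simpa using hk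
      simp [ewPsums, ih (c + x) k hk', add_assoc]

lemma ewPfx_get (numbers : List Int) (j : Nat) (h : j ≤ numbers.length) :
    PySem.List.pyGetD (ewBPrefix numbers) (j : Int) 0 = (numbers.take j).sum := by
  rw [ewBPrefix_eq]
  rw [PySem.List.pyGetD_natCast]
  cases j with
  | zero => simp
  | succ j =>
    have hj : j < numbers.length := by omega
    simp [List.getD, ewPsums_get numbers 0 j hj]

lemma ewSlice_sum (numbers : List Int) (i e : Nat) (hie : i ≤ e) :
    ((numbers.drop i).take (e - i)).sum = (numbers.take e).sum - (numbers.take i).sum := by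
  have h : numbers.take e = numbers.take i ++ (numbers.drop i).take (e - i) := by
    rw [← List.take_add]; congr 1; omega
  rw [h, List.sum_append]; ring

-- B's per-index search with an explicit start-of-range parameter
def ewSpecFrom (numbers : List Int) (weakness : Int) (pfx : List Int) (start : Nat) (first : Int) : Option Int :=
  let n : Int := numbers.length
  let base := PySem.List.pyGetD pfx (start : Int) 0
  match (PySem.List.pyRange first (n + 1) 1).find?
      (fun j => decide (weakness ≤ PySem.List.pyGetD pfx j 0 - base)) with
  | some j =>
    if PySem.List.pyGetD pfx j 0 - base = weakness then
      match PySem.List.max? (PySem.List.slice numbers (some (start : Int)) (some j)) (fun y => y),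
            PySem.List.min? (PySem.List.slice numbers (some (start : Int)) (some j)) (fun y => y) with
      | some a, some b => some (a + b)
      | _, _ => none
    else none
  | none => none

lemma ewBInner_eq_specFrom (numbers : List Int) (weakness : Int) (pfx : List Int) (start : Nat) :
    ewBInner numbers weakness pfx start
      = ewSpecFrom numbers weakness pfx start (min ((start : Int) + 2) numbers.length) := rfl

-- the slice numbers[i : i+L] equals the clamped-end window numbers[i : min(i+L, n)]
lemma ewWindow_eq (numbers : List Int) (i L : Nat) :
    (numbers.drop i).take L = (numbers.drop i).take (min (i + L) numbers.length - i) := by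
  by_cases h : i + L ≤ numbers.length
  · congr 1; omega
  · have h1 : (numbers.drop i).length ≤ L := by simp; omega
    have h2 : (numbers.drop i).length ≤ min (i + L) numbers.length - i := by simp; omega
    rw [List.take_of_length_le h1, List.take_of_length_le h2]

-- core loop lemma: A's fueled grow-loop equals B's first-crossing search
lemma ewLoop_eq (numbers : List Int) (weakness : Int) (i : Nat) (hi : i < numbers.length) :
    ∀ (fuel L : Nat), 2 ≤ L →
      numbers.length + 1 ≤ fuel + min (i + L) numbers.length →
      (∃ j : Nat, min (i + L) numbers.length ≤ j ∧ j ≤ numbers.length ∧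
          weakness ≤ ((numbers.drop i).take (j - i)).sum) →
      ewAInner numbers weakness i L fuel
        = some (ewSpecFrom numbers weakness (ewBPrefix numbers) i
            ((min (i + L) numbers.length : Nat) : Int)) := by
  intro fuel
  induction fuel with
  | zero =>
    intro L _ hfuel _
    exfalso; have := Nat.min_le_right (i + L) numbers.length; omega
  | succ fuel ih =>
    intro L hL2 hfuel hcross
    set n := numbers.length with hn
    set e := min (i + L) n with he
    have hie : i < e := by omega
    have hen : e ≤ n := by omega
    -- the window A looks at and its sum
    have hslice : PySem.List.slice numbers (some (i : Int)) (some ((i : Int) + (L : Int)))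
        = (numbers.drop i).take (e - i) := by
      rw [PySem.List.slice_natCast_add, ewWindow_eq]
    have hsum : ((numbers.drop i).take (e - i)).sum = (numbers.take e).sum - (numbers.take i).sum :=
      ewSlice_sum numbers i e (by omega)
    -- B-side: value of the predicate at e
    have hbase : PySem.List.pyGetD (ewBPrefix numbers) ((i : Nat) : Int) 0 = (numbers.take i).sum :=
      ewPfx_get numbers i (by omega)
    have hgete : PySem.List.pyGetD (ewBPrefix numbers) ((e : Nat) : Int) 0 = (numbers.take e).sum :=
      ewPfx_get numbers e hen
    have hrange : PySem.List.pyRange ((e : Nat) : Int) ((n : Nat) + 1) 1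
        = ((e : Nat) : Int) :: PySem.List.pyRange (((e : Nat) : Int) + 1) ((n : Nat) + 1) 1 := by
      apply PySem.List.pyRange_one_cons; omega
    set s := ((numbers.drop i).take (e - i)).sum with hs
    rcases lt_trichotomy s weakness with hlt | heq | hgt
    · -- s < weakness: A grows the window; B's search skips e
      by_cases hesat : e = n
      · -- saturated window already: crossing contradicts s < weakness
        exfalso
        obtain ⟨j, hj1, hj2, hj3⟩ := hcross
        have : j = n := by omega
        subst this; rw [← hesat] at hj3; omega
      · have henlt : e < n := by omega
        have heL : e = i + L := by omega
        have hstep : min (i + (L + 1)) n = e + 1 := by omega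
        -- A's step
        have hA : ewAInner numbers weakness i L (fuel + 1)
            = ewAInner numbers weakness i (L + 1) fuel := by
          rw [ewAInner]
          simp only [hslice, ← hs]
          rw [if_neg (by omega), if_neg (by omega)]
        rw [hA]
        -- B's search drops the failing head e
        have hpred : (decide (weakness ≤ PySem.List.pyGetD (ewBPrefix numbers) ((e : Nat) : Int) 0
            - PySem.List.pyGetD (ewBPrefix numbers) ((i : Nat) : Int) 0)) = false := by
          simp only [hgete, hbase, decide_eq_false_iff_not]
          omega
        have hspec : ewSpecFrom numbers weakness (ewBPrefix numbers) i ((e : Nat) : Int)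
            = ewSpecFrom numbers weakness (ewBPrefix numbers) i (((e + 1 : Nat) : Nat) : Int) := by
          unfold ewSpecFrom
          simp only [← hn, hrange, List.find?_cons, hpred]
          norm_num [Nat.cast_add]
        rw [hspec] at *
        have hcross' : ∃ j : Nat, min (i + (L + 1)) n ≤ j ∧ j ≤ n ∧
            weakness ≤ ((numbers.drop i).take (j - i)).sum := by
          obtain ⟨j, hj1, hj2, hj3⟩ := hcross
          refine ⟨j, ?_, hj2, hj3⟩
          rcases Nat.eq_or_lt_of_le hj1 with hje | hje
          · exfalso; rw [← hje] at hj3; omega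
          · omega
        have := ih (L + 1) (by omega) (by omega) hcross'
        rw [this, hstep]
    · -- s = weakness: A returns max+min of the window, B's search finds e with equality
      rw [ewAInner]
      simp only [hslice, ← hs]
      rw [if_pos heq]
      unfold ewSpecFrom
      simp only [← hn, hrange, List.find?_cons]
      have hpred : (decide (weakness ≤ PySem.List.pyGetD (ewBPrefix numbers) ((e : Nat) : Int) 0
          - PySem.List.pyGetD (ewBPrefix numbers) ((i : Nat) : Int) 0)) = true := by
        simp only [hgete, hbase, decide_eq_true_eq]; omega
      simp only [hpred]
      rw [if_pos (by rw [hgete, hbase]; omega)]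
      have hsl : PySem.List.slice numbers (some ((i : Nat) : Int)) (some ((e : Nat) : Int))
          = (numbers.drop i).take (e - i) := by
        rw [PySem.List.slice_natCast]
      rw [hsl]
      unfold ewAMaxMin
      rfl
    · -- s > weakness: A breaks, B's search finds e but the equality test fails
      rw [ewAInner]
      simp only [hslice, ← hs]
      rw [if_neg (by omega), if_pos (by omega)]
      unfold ewSpecFrom
      simp only [← hn, hrange, List.find?_cons]
      have hpred : (decide (weakness ≤ PySem.List.pyGetD (ewBPrefix numbers) ((e : Nat) : Int) 0
          - PySem.List.pyGetD (ewBPrefix numbers) ((i : Nat) : Int) 0)) = true := by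
        simp only [hgete, hbase, decide_eq_true_eq]; omega
      simp only [hpred]
      rw [if_neg (by rw [hgete, hbase]; omega)]

lemma ewInner_eq (numbers : List Int) (weakness : Int) (i : Nat) (hi : i < numbers.length)
    (hcross : ∃ j : Nat, min (i + 2) numbers.length ≤ j ∧ j ≤ numbers.length ∧
        weakness ≤ ((numbers.drop i).take (j - i)).sum) :
    ewAInner numbers weakness i 2 (numbers.length + 1)
      = some (ewBInner numbers weakness (ewBPrefix numbers) i) := by
  have h := ewLoop_eq numbers weakness i hi (numbers.length + 1) 2 (le_refl 2)
      (by have := Nat.min_le_right (i + 2) numbers.length; omega) hcross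
  rw [h, ewBInner_eq_specFrom]
  have hc : ((min (i + 2) numbers.length : Nat) : Int) = min ((i : Int) + 2) (numbers.length : Int) := by
    push_cast [Nat.cast_min]
    rfl
  rw [hc]

-- find? on pyRange a b 1 returns the first in-range index satisfying the predicate
lemma ewFindFirst (p : Int → Bool) (b : Int) :
    ∀ (m : Nat) (a j : Int), (j - a).toNat = m → a ≤ j → j < b → p j = true →
      (∀ x, a ≤ x → x < j → p x = false) →
      (PySem.List.pyRange a b 1).find? p = some j := by
  intro m
  induction m with
  | zero =>
    intro a j hm haj hjb hp _
    have : a = j := by omega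
    subst this
    rw [PySem.List.pyRange_one_cons (by omega), List.find?_cons, hp]
  | succ m ih =>
    intro a j hm haj hjb hp hmin
    have halt : a < j := by omega
    rw [PySem.List.pyRange_one_cons (by omega), List.find?_cons,
      hmin a (le_refl a) halt]
    exact ih (a + 1) j (by omega) (by omega) hjb hp (fun x hx1 hx2 => hmin x (by omega) hx2)

-- if some window starting at k sums exactly to the weakness before any window reaches it,
-- B's per-index search returns a value
lemma ewBInner_of_ret (numbers : List Int) (weakness : Int) (k : Nat)
    (hk : k < numbers.length) (j : Nat) (hj : j ≤ numbers.length)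
    (hfirst : min (k + 2) numbers.length ≤ j)
    (heq : ewS numbers k j = weakness)
    (hmin : ∀ j' < j, min (k + 2) numbers.length ≤ j' → ewS numbers k j' < weakness) :
    ewBInner numbers weakness (ewBPrefix numbers) k ≠ none := by
  set n := numbers.length with hn
  have hkj : k < j := by omega
  have hbase : PySem.List.pyGetD (ewBPrefix numbers) ((k : Nat) : Int) 0 = (numbers.take k).sum :=
    ewPfx_get numbers k (by omega)
  have hpredT : ∀ j' : Nat, k ≤ j' → j' ≤ n →
      (decide (weakness ≤ PySem.List.pyGetD (ewBPrefix numbers) ((j' : Nat) : Int) 0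
        - PySem.List.pyGetD (ewBPrefix numbers) ((k : Nat) : Int) 0))
      = decide (weakness ≤ ewS numbers k j') := by
    intro j' h1 h2
    rw [ewPfx_get numbers j' h2, hbase]
    congr 1
    rw [eq_iff_iff]
    unfold ewS
    rw [ewSlice_sum numbers k j' h1]
  have hc : ((min (k + 2) n : Nat) : Int) = min ((k : Int) + 2) ((n : Nat) : Int) := by
    push_cast [Nat.cast_min]
    rfl
  have hfind : (PySem.List.pyRange (min ((k : Int) + 2) ((n : Nat) : Int)) (((n : Nat) : Int) + 1) 1).find?
      (fun x => decide (weakness ≤ PySem.List.pyGetD (ewBPrefix numbers) x 0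
        - PySem.List.pyGetD (ewBPrefix numbers) ((k : Nat) : Int) 0)) = some ((j : Nat) : Int) := by
    apply ewFindFirst _ _ (((j : Nat) : Int) - min ((k : Int) + 2) ((n : Nat) : Int)).toNat _ _ rfl
    · rw [← hc]; exact_mod_cast hfirst
    · exact_mod_cast Nat.lt_succ_of_le hj
    · rw [hpredT j (by omega) hj]
      simp [heq]
    · intro x hx1 hx2
      have h0 : (0 : Int) ≤ x := by rw [← hc] at hx1; omega
      obtain ⟨j', rfl⟩ := Int.eq_ofNat_of_zero_le h0
      rw [← hc] at hx1
      have h1 : min (k + 2) n ≤ j' := by exact_mod_cast hx1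
      have h2 : j' < j := by exact_mod_cast hx2
      rw [hpredT j' (by omega) (by omega)]
      simp only [decide_eq_false_iff_not, not_le]
      exact hmin j' h2 h1
  unfold ewBInner
  simp only [← hn, hfind]
  rw [if_pos (by
    rw [ewPfx_get numbers j hj, hbase]
    have := ewSlice_sum numbers k j (by omega)
    unfold ewS at heq
    omega)]
  have hne : PySem.List.slice numbers (some ((k : Nat) : Int)) (some ((j : Nat) : Int)) ≠ [] := by
    rw [PySem.List.slice_natCast]
    simp only [ne_eq, List.take_eq_nil_iff, List.drop_eq_nil_iff]
    omega
  rcases hma : PySem.List.max? (PySem.List.slice numbers (some ((k : Nat) : Int)) (some ((j : Nat) : Int))) (fun y => y) with _ | a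
  · exact absurd ((PySem.List.max?_eq_none_iff _ _).mp hma) hne
  · rcases hmi : PySem.List.min? (PySem.List.slice numbers (some ((k : Nat) : Int)) (some ((j : Nat) : Int))) (fun y => y) with _ | b
    · exact absurd ((PySem.List.min?_eq_none_iff _ _).mp hmi) hne
    · simp

-- the Bool precondition, read back as the quantified statements the outer induction uses
lemma ewNoCross_iff (numbers : List Int) (weakness : Int) (i : Nat) :
    ewNoCross numbers weakness i = true ↔
    ∀ j < numbers.length + 1, min (i + 2) numbers.length ≤ j → ewS numbers i j < weakness := by
  unfold ewNoCross
  rw [List.all_eq_true]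
  constructor
  · intro h j hj hm
    have h2 := h j (List.mem_range.mpr hj)
    simp only [Bool.or_eq_true, Bool.not_eq_true', decide_eq_true_eq,
      decide_eq_false_iff_not] at h2
    rcases h2 with h' | h'
    · omega
    · exact h'
  · intro h x hx
    rw [List.mem_range] at hx
    simp only [Bool.or_eq_true, Bool.not_eq_true', decide_eq_true_eq, decide_eq_false_iff_not]
    by_cases hm : min (i + 2) numbers.length ≤ x
    · exact Or.inr (h x hx hm)
    · exact Or.inl hm

lemma ewRet_iff (numbers : List Int) (weakness : Int) (k : Nat) :
    ewRet numbers weakness k = true ↔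
    ∃ j < numbers.length + 1, min (k + 2) numbers.length ≤ j ∧ ewS numbers k j = weakness ∧
      ∀ j' < j, min (k + 2) numbers.length ≤ j' → ewS numbers k j' < weakness := by
  unfold ewRet
  rw [List.any_eq_true]
  constructor
  · rintro ⟨j, hj, hp⟩
    rw [List.mem_range] at hj
    simp only [Bool.and_eq_true, decide_eq_true_eq, List.all_eq_true] at hp
    obtain ⟨⟨h1, h2⟩, h3⟩ := hp
    refine ⟨j, hj, h1, h2, ?_⟩
    intro j' hj' hm
    have h4 := h3 j' (List.mem_range.mpr hj')
    simp only [Bool.or_eq_true, Bool.not_eq_true', decide_eq_true_eq,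
      decide_eq_false_iff_not] at h4
    rcases h4 with h' | h'
    · omega
    · exact h'
  · rintro ⟨j, hj, h1, h2, h3⟩
    refine ⟨j, List.mem_range.mpr hj, ?_⟩
    simp only [Bool.and_eq_true, decide_eq_true_eq, List.all_eq_true]
    refine ⟨⟨h1, h2⟩, ?_⟩
    intro j' hj'
    rw [List.mem_range] at hj'
    simp only [Bool.or_eq_true, Bool.not_eq_true', decide_eq_true_eq, decide_eq_false_iff_not]
    by_cases hm : min (k + 2) numbers.length ≤ j'
    · exact Or.inr (h3 j' hj' hm)
    · exact Or.inl hm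

lemma ewPre_iff (numbers : List Int) (weakness : Int) :
    Pre_exploit_weakness numbers weakness ↔
    ∀ i < numbers.length,
      (∀ j < numbers.length + 1,
          min (i + 2) numbers.length ≤ j → ewS numbers i j < weakness) →
      ∃ k < i, ∃ j < numbers.length + 1,
        min (k + 2) numbers.length ≤ j ∧ ewS numbers k j = weakness ∧
        ∀ j' < j, min (k + 2) numbers.length ≤ j' → ewS numbers k j' < weakness := by
  unfold Pre_exploit_weakness
  rw [List.all_eq_true]
  constructor
  · intro h i hi hno
    have h2 := h i (List.mem_range.mpr hi)
    simp only [Bool.or_eq_true, Bool.not_eq_true', List.any_eq_true, List.mem_range] at h2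
    rcases h2 with h2 | ⟨k, hk, hret⟩
    · rw [(ewNoCross_iff numbers weakness i).mpr hno] at h2
      cases h2
    · exact ⟨k, hk, (ewRet_iff numbers weakness k).mp hret⟩
  · intro h x hx
    rw [List.mem_range] at hx
    simp only [Bool.or_eq_true, Bool.not_eq_true', List.any_eq_true, List.mem_range]
    by_cases hnc : ewNoCross numbers weakness x = true
    · obtain ⟨k, hk, hret⟩ := h x hx ((ewNoCross_iff numbers weakness x).mp hnc)
      exact Or.inr ⟨k, hk, (ewRet_iff numbers weakness k).mpr hret⟩
    · exact Or.inl (by simpa using hnc)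

-- outer loop: under Pre_, once every earlier start index produced no value, A and B agree
lemma ewOuter_eq (numbers : List Int) (weakness : Int)
    (hpre : Pre_exploit_weakness numbers weakness) :
    ∀ (m i : Nat), i + m = numbers.length →
      (∀ k < i, ewBInner numbers weakness (ewBPrefix numbers) k = none) →
      ewAOuter numbers weakness (List.range' i m)
        = ewBOuter numbers weakness (ewBPrefix numbers) (List.range' i m) := by
  intro m
  induction m with
  | zero => intro i _ _; rfl
  | succ m ih =>
    intro i hm hbrk
    have hi : i < numbers.length := by omega
    have hcross : ∃ j : Nat, min (i + 2) numbers.length ≤ j ∧ j ≤ numbers.length ∧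
        weakness ≤ ((numbers.drop i).take (j - i)).sum := by
      by_contra hnc
      push Not at hnc
      obtain ⟨k, hki, j, hjlt, hjfirst, hjeq, hjmin⟩ := (ewPre_iff numbers weakness).mp hpre i hi (by
        intro j hj hjf
        have h := hnc j hjf (by omega)
        simpa [ewS] using h)
      exact (ewBInner_of_ret numbers weakness k (by omega) j (by omega) hjfirst hjeq hjmin)
        (hbrk k hki)
    rw [List.range'_succ, ewAOuter, ewBOuter, ewInner_eq numbers weakness i hi hcross]
    cases hcase : ewBInner numbers weakness (ewBPrefix numbers) i with
    | some v => rfl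
    | none =>
      have hrest := ih (i + 1) (by omega) (by
        intro k hk
        rcases Nat.lt_or_ge k i with h | h
        · exact hbrk k h
        · have : k = i := by omega
          subst this
          exact hcase)
      exact hrest

-- ===== VERDICT (by name: the statement is the Claim_ definition above) =====
theorem exploit_weakness_spec : Claim_equal_exploit_weakness := by
  intro numbers weakness _hdom hpre
  unfold Spec_exploit_weakness exploit_weakness exploit_weakness_alt
  rw [List.range_eq_range']
  exact ewOuter_eq numbers weakness hpre numbers.length 0 (by omega)
    (by intro k hk; omega)
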